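-- pv_equiv track=rewrite | github.com/shishirgupta1978/ttt | backend/alt_text_generator/alt_text_prediction.py | remove_from_end
-- ===== SOURCE A (Python) =====
-- def remove_from_end(string):
--     conjunctions = ['and', 'or', 'but', 'nor', 'for', 'yet', 'so', 'are', 'of', 'a', 'an', 'the', 'that', 'this', 'by']
--     words = string.split()
--
--     # Iterate over the words from the end of the string
--     for i in range(len(words) - 1, 0, -1):
--         if words[i].lower() not in conjunctions:
--             break  # Stop when a non-conjunction word is found
--         else:
--             words.pop(i)  # Remove the conjunction word
--
--     return ' '.join(words)
-- ===== SOURCE B (Python) =====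
-- def remove_from_end(string):
--     conjunctions = ['and', 'or', 'but', 'nor', 'for', 'yet', 'so', 'are', 'of', 'a', 'an', 'the', 'that', 'this', 'by']
--     words = string.split()
--     last = 0
--     for i, w in enumerate(words):
--         if w.lower() not in conjunctions:
--             last = i
--     return ' '.join(words[:last + 1])
-- ===== Notes on version B (the rewrite author's own statement) =====
-- stated objective: alternative
-- what changed: B replaces A's backward pop-with-break loop that mutates the word list by a single forward enumerate pass tracking the last non-conjunction index, then one slice and join.
import Mathlib
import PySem

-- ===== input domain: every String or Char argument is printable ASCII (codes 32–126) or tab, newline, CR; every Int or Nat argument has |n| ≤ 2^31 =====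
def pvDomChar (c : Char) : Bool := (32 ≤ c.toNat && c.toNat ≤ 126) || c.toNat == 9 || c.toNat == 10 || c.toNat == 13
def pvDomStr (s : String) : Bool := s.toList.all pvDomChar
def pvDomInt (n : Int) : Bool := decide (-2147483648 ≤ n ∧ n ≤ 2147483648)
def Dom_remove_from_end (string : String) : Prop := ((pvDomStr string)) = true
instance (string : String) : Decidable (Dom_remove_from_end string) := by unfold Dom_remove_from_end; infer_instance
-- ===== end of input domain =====

-- B replaces A's backward pop-with-break loop by a forward pass finding the last
-- non-conjunction index plus one slice (alternative decomposition, same cost).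

-- shared literal: the conjunction word list both Pythons spell out
def pvConj : List String :=
  ["and", "or", "but", "nor", "for", "yet", "so", "are", "of", "a", "an", "the", "that", "this", "by"]

-- ===== PORT A =====
-- A's for-loop over range(len(words)-1, 0, -1) with break/pop, as countdown recursion
-- on the index; the `none` match arms only make the indexing total (never reached).
def pvLoopA (ws : List String) : Nat → List String
  | 0 => ws
  | i + 1 =>
    match PySem.List.pyGet? ws ((i : Int) + 1) with
    | none => ws
    | some w =>
      if PySem.Str.lower w ∈ pvConj then
        match PySem.List.pop? ws ((i : Int) + 1) with
        | none => ws
        | some r => pvLoopA r.2 i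
      else ws

def remove_from_end (string : String) : String :=
  let words := PySem.Str.split₀ string
  PySem.Str.join " " (pvLoopA words (words.length - 1))

-- ===== PORT B =====
def remove_from_end_alt (string : String) : String :=
  let words := PySem.Str.split₀ string
  let last := (PySem.List.enumerate words 0).foldl
    (fun acc p => if PySem.Str.lower p.2 ∈ pvConj then acc else p.1) 0
  PySem.Str.join " " (PySem.List.slice words none (some (last + 1)))

-- ===== PRECONDITION & SPEC =====
def Spec_remove_from_end (string : String) (out : String) : Prop := out = remove_from_end_alt string
instance (string : String) (out : String) : Decidable (Spec_remove_from_end string out) := by unfold Spec_remove_from_end; infer_instance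

-- ===== CLAIM (what is proved, stated in full; the proofs are below) =====
def Claim_equal_remove_from_end : Prop := ∀ (string : String), Dom_remove_from_end string → Spec_remove_from_end string (remove_from_end string)

-- ===== LEMMAS AND PROOFS =====

-- B's fold, named for the proofs
def pvLast (ws : List String) : Int :=
  (PySem.List.enumerate ws 0).foldl
    (fun acc p => if PySem.Str.lower p.2 ∈ pvConj then acc else p.1) 0

theorem pvLast_append (xs : List String) (x : String) :
    pvLast (xs ++ [x]) =
      if PySem.Str.lower x ∈ pvConj then pvLast xs else (xs.length : Int) := by
  simp [pvLast, PySem.List.enumerate_append, PySem.List.enumerate_cons, PySem.List.enumerate_nil]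

theorem pvLast_bounds (ws : List String) :
    0 ≤ pvLast ws ∧ (ws = [] → pvLast ws = 0) ∧ (ws ≠ [] → pvLast ws < ws.length) := by
  induction ws using List.reverseRecOn with
  | nil => simp [pvLast, PySem.List.enumerate_nil]
  | append_singleton xs x ih =>
    obtain ⟨h0, he, hn⟩ := ih
    rw [pvLast_append]
    by_cases hc : PySem.Str.lower x ∈ pvConj
    · simp only [if_pos hc]
      refine ⟨h0, by simp, fun _ => ?_⟩
      rcases eq_or_ne xs [] with rfl | hne
      · simp [he rfl]
      · have := hn hne
        simp only [List.length_append, List.length_singleton]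
        push_cast
        omega
    · simp only [if_neg hc]
      refine ⟨by positivity, by simp, fun _ => ?_⟩
      simp only [List.length_append, List.length_singleton]
      push_cast
      omega

theorem pvLoopA_eq_take (ws : List String) :
    pvLoopA ws (ws.length - 1) = ws.take ((pvLast ws).toNat + 1) := by
  induction ws using List.reverseRecOn with
  | nil => simp [pvLoopA]
  | append_singleton xs x ih =>
    rcases eq_or_ne xs [] with rfl | hne
    · simp [pvLoopA]
    · obtain ⟨k, hk⟩ : ∃ k, xs.length = k + 1 :=
        ⟨xs.length - 1, by have := List.length_pos_of_ne_nil hne; omega⟩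
      have hlen : (xs ++ [x]).length - 1 = k + 1 := by simp [hk]
      have hget : PySem.List.pyGet? (xs ++ [x]) ((k : Int) + 1) = some x := by
        have : ((k : Int) + 1) = (xs.length : Int) := by rw [hk]; push_cast; ring
        rw [this, PySem.List.pyGet?_append_length]
      rw [hlen]
      by_cases hc : PySem.Str.lower x ∈ pvConj
      · have hpop : PySem.List.pop? (xs ++ [x]) ((k : Int) + 1) =
            some ((xs ++ [x])[k + 1]'(by simp [hk]), (xs ++ [x]).eraseIdx (k + 1)) := by
          have h1 : ((k : Int) + 1) = ((k + 1 : Nat) : Int) := by push_cast; ring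
          have h2 : k + 1 < (xs ++ [x]).length := by simp [hk]
          rw [h1, PySem.List.pop?_natCast]
        have herase : (xs ++ [x]).eraseIdx (k + 1) = xs := by
          rw [List.eraseIdx_append_of_length_le (by omega)]
          simp [hk]
        have hlast : pvLast (xs ++ [x]) = pvLast xs := by
          rw [pvLast_append, if_pos hc]
        simp only [pvLoopA, hget, if_pos hc, hpop, herase]
        rw [show k = xs.length - 1 by omega, ih, hlast]
        have hb := (pvLast_bounds xs).1
        have hlt := (pvLast_bounds xs).2.2 hne
        rw [List.take_append_of_le_length (by omega)]
      · have hlast : pvLast (xs ++ [x]) = (xs.length : Int) := by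
          rw [pvLast_append, if_neg hc]
        simp only [pvLoopA, hget, if_neg hc, hlast, Int.toNat_natCast]
        exact (List.take_of_length_le (by simp)).symm

theorem slice_to_of_nonneg (xs : List String) (b : Int) (hb : 0 ≤ b) :
    PySem.List.slice xs none (some b) = xs.take b.toNat := by
  have h : b = ((b.toNat : Nat) : Int) := by omega
  conv_lhs => rw [h]
  rw [PySem.List.slice_to_natCast]

-- ===== VERDICT (by name: the statement is the Claim_ definition above) =====
theorem remove_from_end_spec : Claim_equal_remove_from_end := by
  intro s _
  show PySem.Str.join " " (pvLoopA (PySem.Str.split₀ s) ((PySem.Str.split₀ s).length - 1))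
      = PySem.Str.join " " (PySem.List.slice (PySem.Str.split₀ s) none (some (pvLast (PySem.Str.split₀ s) + 1)))
  have hb := (pvLast_bounds (PySem.Str.split₀ s)).1
  rw [slice_to_of_nonneg _ _ (by omega), pvLoopA_eq_take]
  congr 2
  omega
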